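-- pv_equiv track=rewrite | github.com/lcacchiani/evolvesprouts | backend/src/app/templates/booking_confirmation_render.py | _fold_ical_line
-- ===== SOURCE A (Python) =====
-- _ICS_LINE_MAX = 75
--
-- def _utf8_prefix_end_index(text: str, max_octets: int) -> int:
--     """Largest end index such that text[:end].encode('utf-8') fits in max_octets."""
--     if max_octets <= 0:
--         return 0
--     lo, hi = 0, len(text)
--     best = 0
--     while lo <= hi:
--         mid = (lo + hi) // 2
--         if len(text[:mid].encode("utf-8")) <= max_octets:
--             best = mid
--             lo = mid + 1
--         else:
--             hi = mid - 1
--     return best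
--
-- def _fold_ical_line(line: str, max_octets: int = _ICS_LINE_MAX) -> str:
--     """Fold at UTF-8 octet boundaries (RFC 5545 section 3.1: 75 octets per physical line)."""
--     if len(line.encode("utf-8")) <= max_octets:
--         return line
--     parts: list[str] = []
--     rest = line
--     while len(rest.encode("utf-8")) > max_octets:
--         cut = _utf8_prefix_end_index(rest, max_octets)
--         if cut == 0:
--             cut = 1
--         parts.append(rest[:cut])
--         rest = " " + rest[cut:]
--     if rest:
--         parts.append(rest)
--     return "\r\n".join(parts)
-- ===== SOURCE B (Python) =====
-- _ICS_LINE_MAX = 75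
--
-- def _fold_ical_line(line: str, max_octets: int = _ICS_LINE_MAX) -> str:
--     """Fold at UTF-8 octet boundaries in one left-to-right pass over the characters."""
--     chunks = []
--     cur = ""
--     used = 0
--     for ch in line:
--         w = len(ch.encode("utf-8"))
--         if used + w > max_octets:
--             chunks.append(cur)
--             cur = " "
--             used = 1
--         cur += ch
--         used += w
--     chunks.append(cur)
--     return "\r\n".join(chunks)
-- ===== Notes on version B (the rewrite author's own statement) =====
-- stated objective: alternative
-- what changed: Replaced the repeated (binary-search + re-encode whole prefixes) chunking loop with a single left-to-right pass that tracks the cumulative UTF-8 octet count and starts a new continuation line when the limit would be exceeded.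
import Mathlib
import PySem

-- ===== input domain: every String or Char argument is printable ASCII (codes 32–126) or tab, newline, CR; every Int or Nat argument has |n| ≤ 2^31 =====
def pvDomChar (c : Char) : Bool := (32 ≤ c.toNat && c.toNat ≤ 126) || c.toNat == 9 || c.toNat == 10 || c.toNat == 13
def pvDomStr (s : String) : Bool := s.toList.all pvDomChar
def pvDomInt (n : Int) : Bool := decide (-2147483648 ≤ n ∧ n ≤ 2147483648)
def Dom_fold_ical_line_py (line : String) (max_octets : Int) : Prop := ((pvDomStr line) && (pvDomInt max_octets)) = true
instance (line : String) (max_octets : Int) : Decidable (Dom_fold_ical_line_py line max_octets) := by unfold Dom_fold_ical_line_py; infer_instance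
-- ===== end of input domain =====

-- B replaces A's repeated binary-search-and-re-encode chunking with a single left-to-right pass
-- over the characters that tracks the cumulative UTF-8 octet count (objective: alternative).


-- ===== PORT A =====
-- len(ch.encode("utf-8")) for a single code point (exact for every Char)
def pyUtf8Width (c : Char) : Int :=
  if c.toNat < 128 then 1 else if c.toNat < 2048 then 2 else if c.toNat < 65536 then 3 else 4

-- len(s.encode("utf-8"))
def pyUtf8Len (l : List Char) : Int := (l.map pyUtf8Width).sum

-- "\r\n".join(parts)
def joinCRLF (parts : List (List Char)) : String := String.ofList (List.intercalate ['\r', '\n'] parts)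

-- the 'while lo <= hi' binary-search loop of _utf8_prefix_end_index; fuel only makes it total
-- (hi - lo strictly decreases, so text.length + 2 steps always suffice)
def prefEndLoop (text : List Char) (maxo : Int) : Nat → Int → Int → Int → Int
  | 0, _, _, best => best
  | fuel + 1, lo, hi, best =>
    if lo ≤ hi then
      let mid := PySem.Int.floordiv (lo + hi) 2
      if pyUtf8Len (PySem.List.slice text none (some mid)) ≤ maxo then
        prefEndLoop text maxo fuel (mid + 1) hi mid
      else
        prefEndLoop text maxo fuel lo (mid - 1) best
    else best

def utf8_prefix_end_index (text : List Char) (maxo : Int) : Int :=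
  if maxo ≤ 0 then 0
  else prefEndLoop text maxo (text.length + 2) 0 (text.length : Int) 0

-- the 'while len(rest.encode("utf-8")) > max_octets' loop; fuel only makes it total
-- (wherever Python A terminates, line.length + 1 steps suffice)
def foldLoopA (maxo : Int) : Nat → List (List Char) → List Char → List (List Char) × List Char
  | 0, parts, rest => (parts, rest)
  | fuel + 1, parts, rest =>
    if maxo < pyUtf8Len rest then
      let cut0 := utf8_prefix_end_index rest maxo
      let cut := if cut0 = 0 then 1 else cut0
      foldLoopA maxo fuel (parts ++ [PySem.List.slice rest none (some cut)])
        (' ' :: PySem.List.slice rest (some cut) none)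
    else (parts, rest)

def fold_ical_line_py (line : String) (max_octets : Int) : String :=
  let l := line.toList
  if pyUtf8Len l ≤ max_octets then line
  else
    let pr := foldLoopA max_octets (l.length + 1) [] l
    let parts := if pr.2 ≠ [] then pr.1 ++ [pr.2] else pr.1
    joinCRLF parts

-- ===== PORT B =====
-- one step of Source B's for-loop: state = (chunks, cur, used)
def bStep (maxo : Int) (st : List (List Char) × List Char × Int) (ch : Char) :
    List (List Char) × List Char × Int :=
  let w := pyUtf8Width ch
  if maxo < st.2.2 + w then (st.1 ++ [st.2.1], [' ', ch], 1 + w)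
  else (st.1, st.2.1 ++ [ch], st.2.2 + w)

def fold_ical_line_py_alt (line : String) (max_octets : Int) : String :=
  let st := line.toList.foldl (bStep max_octets) ([], [], 0)
  joinCRLF (st.1 ++ [st.2.1])

-- ===== PRECONDITION & SPEC =====
-- Pre_ excludes exactly the inputs on which Python A never returns: if the line is longer than
-- max_octets (in UTF-8 octets = characters on the ASCII domain) and max_octets ≤ 1, the forced
-- cut of 1 leaves " " + rest[1:] the same length forever and A's while-loop diverges.
def Pre_fold_ical_line_py (line : String) (max_octets : Int) : Prop :=
  (line.toList.length : Int) ≤ max_octets ∨ 2 ≤ max_octets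
instance (line : String) (max_octets : Int) : Decidable (Pre_fold_ical_line_py line max_octets) := by
  unfold Pre_fold_ical_line_py; infer_instance

def pvWitness_fold_ical_line_py : String × Int := ("abc", 2)

def Spec_fold_ical_line_py (line : String) (max_octets : Int) (out : String) : Prop := out = fold_ical_line_py_alt line max_octets
instance (line : String) (max_octets : Int) (out : String) : Decidable (Spec_fold_ical_line_py line max_octets out) := by unfold Spec_fold_ical_line_py; infer_instance

-- ===== CLAIM (what is proved, stated in full; the proofs are below) =====
def Claim_equal_fold_ical_line_py : Prop := ∀ (line : String) (max_octets : Int), Dom_fold_ical_line_py line max_octets → Pre_fold_ical_line_py line max_octets → Spec_fold_ical_line_py line max_octets (fold_ical_line_py line max_octets)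

-- ===== LEMMAS AND PROOFS =====

-- on the ASCII domain every character weighs one octet
theorem width_one_of_dom {c : Char} (h : pvDomChar c = true) : pyUtf8Width c = 1 := by
  have hlt : c.toNat < 128 := by
    simp [pvDomChar] at h
    omega
  simp [pyUtf8Width, hlt]

theorem len_ascii {l : List Char} (h : ∀ c ∈ l, pyUtf8Width c = 1) :
    pyUtf8Len l = (l.length : Int) := by
  induction l with
  | nil => simp [pyUtf8Len]
  | cons c t ih =>
    simp [pyUtf8Len] at ih ⊢
    rw [h c (by simp), ih (fun x hx => h x (by simp [hx]))]
    ring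

-- binary-search loop invariant: it computes min (text.length) maxo on ASCII text
theorem prefEndLoop_eq {text : List Char} {maxo : Int}
    (hT : ∀ c ∈ text, pyUtf8Width c = 1) (hm : 0 < maxo) :
    ∀ fuel (lo hi best : Int), 0 ≤ lo → lo ≤ hi + 1 → hi ≤ (text.length : Int) →
      min (text.length : Int) maxo ≤ hi →
      best = max 0 (min maxo (lo - 1)) →
      (hi + 1 - lo).toNat < fuel →
      prefEndLoop text maxo fuel lo hi best = min (text.length : Int) maxo := by
  intro fuel
  induction fuel with
  | zero => intro lo hi best _ _ _ _ _ hf; omega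
  | succ fuel ih =>
    intro lo hi best hlo hlohi hhi hmin hbest hf
    rw [prefEndLoop]
    by_cases hle : lo ≤ hi
    · rw [if_pos hle]
      obtain ⟨hml, hmh⟩ := PySem.Int.floordiv_two_mid_bounds hle
      set mid := PySem.Int.floordiv (lo + hi) 2 with hmid
      have hmid0 : 0 ≤ mid := by omega
      have hcond : pyUtf8Len (PySem.List.slice text none (some mid)) = mid := by
        rw [PySem.List.slice_to text hmid0]
        rw [len_ascii (fun c hc => hT c (List.mem_of_mem_take hc))]
        have : (List.take mid.toNat text).length = mid.toNat := by
          rw [List.length_take]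
          omega
        rw [this]
        omega
      by_cases hc : mid ≤ maxo
      · rw [if_pos (by rw [hcond]; exact hc)]
        exact ih (mid + 1) hi mid (by omega) (by omega) hhi hmin (by omega) (by omega)
      · rw [if_neg (by rw [hcond]; omega)]
        exact ih lo (mid - 1) best hlo (by omega) (by omega) (by omega) hbest (by omega)
    · rw [if_neg hle]
      omega

theorem utf8_prefix_end_index_eq {text : List Char} {maxo : Int}
    (hT : ∀ c ∈ text, pyUtf8Width c = 1) (hm : 0 < maxo) :
    utf8_prefix_end_index text maxo = min (text.length : Int) maxo := by
  unfold utf8_prefix_end_index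
  rw [if_neg (by omega)]
  exact prefEndLoop_eq hT hm _ 0 _ 0 (by omega) (by omega) (by omega) (by omega)
    (by omega) (by omega)

-- B's fold when everything still fits: it just appends
theorem bFold_fits {k : Int} {l cur : List Char} {chunks : List (List Char)}
    (hl : ∀ c ∈ l, pyUtf8Width c = 1)
    (hfit : (cur.length : Int) + l.length ≤ k) :
    l.foldl (bStep k) (chunks, cur, (cur.length : Int)) =
      (chunks, cur ++ l, ((cur ++ l).length : Int)) := by
  induction l generalizing cur with
  | nil => simp
  | cons c t ih =>
    have hw : pyUtf8Width c = 1 := hl c (by simp)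
    have hstep : bStep k (chunks, cur, (cur.length : Int)) c =
        (chunks, cur ++ [c], ((cur ++ [c]).length : Int)) := by
      simp only [bStep, hw]
      rw [if_neg (by simp at hfit ⊢; omega)]
      simp
    rw [List.foldl_cons, hstep,
      ih (fun x hx => hl x (by simp [hx])) (by simp at hfit ⊢; omega)]
    simp

-- B's fold across one overflow: it closes the chunk exactly at octet k
theorem bFold_overflow {k : Int} (hk : 2 ≤ k) :
    ∀ (l : List Char), ∀ (cur : List Char) (chunks : List (List Char)),
      (∀ c ∈ l, pyUtf8Width c = 1) →
      (cur.length : Int) ≤ k → k < (cur.length : Int) + l.length →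
      l.foldl (bStep k) (chunks, cur, (cur.length : Int)) =
        (l.drop (k.toNat - cur.length)).foldl (bStep k)
          (chunks ++ [cur ++ l.take (k.toNat - cur.length)], [' '], 1) := by
  intro l
  induction l with
  | nil =>
    intro cur chunks _ hle hgt
    simp at hgt
    omega
  | cons c t ih =>
    intro cur chunks hl hle hgt
    have hw : pyUtf8Width c = 1 := hl c (by simp)
    rw [List.foldl_cons]
    by_cases hov : k < (cur.length : Int) + 1
    · have hd0 : k.toNat - cur.length = 0 := by omega
      have hstep : bStep k (chunks, cur, (cur.length : Int)) c = (chunks ++ [cur], [' ', c], 1 + 1) := by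
        simp only [bStep, hw]
        rw [if_pos (by omega)]
      rw [hstep, hd0]
      simp only [List.take_zero, List.drop_zero, List.append_nil, List.foldl_cons]
      have hstep2 : bStep k (chunks ++ [cur], [' '], 1) c = (chunks ++ [cur], [' ', c], 1 + 1) := by
        simp only [bStep, hw]
        rw [if_neg (by omega)]
        simp
      rw [hstep2]
    · have hstep : bStep k (chunks, cur, (cur.length : Int)) c =
          (chunks, cur ++ [c], ((cur ++ [c]).length : Int)) := by
        simp only [bStep, hw]
        rw [if_neg (by omega)]
        simp
      rw [hstep]
      rw [ih (cur ++ [c]) chunks (fun x hx => hl x (by simp [hx])) (by simp; omega)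
        (by simp at hgt ⊢; omega)]
      have hd : k.toNat - cur.length = (k.toNat - (cur ++ [c]).length) + 1 := by simp; omega
      rw [hd]
      simp [List.take_succ_cons, List.drop_succ_cons, List.append_assoc]

-- main correspondence between A's chunking loop and B's single pass
theorem main_loop {k : Int} (hk : 2 ≤ k) :
    ∀ fuel (l cur : List Char) (chunks : List (List Char)),
      (∀ c ∈ l, pyUtf8Width c = 1) → (cur = [] ∨ cur = [' ']) → cur ++ l ≠ [] →
      l.length ≤ fuel →
      (let pr := foldLoopA k fuel chunks (cur ++ l);
       if pr.2 ≠ [] then pr.1 ++ [pr.2] else pr.1) =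
      (let st := l.foldl (bStep k) (chunks, cur, (cur.length : Int)); st.1 ++ [st.2.1]) := by
  intro fuel
  induction fuel with
  | zero =>
    intro l cur chunks hl hcur hne hlen
    have hl0 : l = [] := by
      cases l with
      | nil => rfl
      | cons a b => simp at hlen
    subst hl0
    rcases hcur with rfl | rfl
    · simp at hne
    · simp [foldLoopA]
  | succ fuel ih =>
    intro l cur chunks hl hcur hne hlen
    have hcurw : ∀ c ∈ cur, pyUtf8Width c = 1 := by
      rcases hcur with rfl | rfl
      · simp
      · intro c hc
        simp at hc
        subst hc
        decide
    have hall : ∀ c ∈ cur ++ l, pyUtf8Width c = 1 := by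
      intro c hc
      rcases List.mem_append.mp hc with h | h
      · exact hcurw c h
      · exact hl c h
    have hrlen : pyUtf8Len (cur ++ l) = ((cur ++ l).length : Int) := len_ascii hall
    have hcur1 : cur.length ≤ 1 := by rcases hcur with rfl | rfl <;> simp
    by_cases hbig : k < ((cur ++ l).length : Int)
    · have hcut0 : utf8_prefix_end_index (cur ++ l) k = k := by
        rw [utf8_prefix_end_index_eq hall (by omega)]
        omega
      have hstepA : foldLoopA k (fuel + 1) chunks (cur ++ l) =
          foldLoopA k fuel (chunks ++ [(cur ++ l).take k.toNat])
            (' ' :: (cur ++ l).drop k.toNat) := by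
        rw [foldLoopA, if_pos (by rw [hrlen]; exact hbig)]
        simp only [hcut0]
        rw [if_neg (show ¬ k = 0 by omega)]
        rw [PySem.List.slice_to _ (by omega : (0:Int) ≤ k),
          PySem.List.slice_from _ (by omega : (0:Int) ≤ k)]
      rw [hstepA]
      have hk2 : 2 ≤ k.toNat := by omega
      have hlenlt : k.toNat < (cur ++ l).length := by
        simp at hbig ⊢
        omega
      have hmain := ih ((cur ++ l).drop k.toNat) [' '] (chunks ++ [(cur ++ l).take k.toNat])
        (fun c hc => hall c (List.mem_of_mem_drop hc))
        (Or.inr rfl) (by simp)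
        (by simp at hlen ⊢; omega)
      have hcons : (' ' :: (cur ++ l).drop k.toNat) = [' '] ++ (cur ++ l).drop k.toNat := rfl
      rw [hcons, hmain]
      -- B side: cross the overflow
      have hgt : k < (cur.length : Int) + l.length := by
        simp at hbig
        omega
      rw [bFold_overflow hk l cur chunks hl (by omega) hgt]
      have htake : (cur ++ l).take k.toNat = cur ++ l.take (k.toNat - cur.length) := by
        simp [List.take_append, List.take_of_length_le (by omega : cur.length ≤ k.toNat)]
      have hdrop : (cur ++ l).drop k.toNat = l.drop (k.toNat - cur.length) := by
        simp [List.drop_append, List.drop_of_length_le (by omega : cur.length ≤ k.toNat)]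
      rw [htake, hdrop]
      norm_num
    · have hstepA : foldLoopA k (fuel + 1) chunks (cur ++ l) = (chunks, cur ++ l) := by
        rw [foldLoopA, if_neg (by rw [hrlen]; exact hbig)]
      rw [hstepA]
      have hfit : (cur.length : Int) + l.length ≤ k := by
        simp at hbig
        omega
      rw [bFold_fits hl hfit]
      simp [hne]

-- ===== VERDICT (by name: the statement is the Claim_ definition above) =====
theorem fold_ical_line_py_spec : Claim_equal_fold_ical_line_py := by
  intro line maxo hdom hpre
  unfold Spec_fold_ical_line_py
  have hascii : ∀ c ∈ line.toList, pyUtf8Width c = 1 := by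
    intro c hc
    apply width_one_of_dom
    unfold Dom_fold_ical_line_py pvDomStr at hdom
    simp [List.all_eq_true] at hdom
    exact hdom.1 c hc
  have hlen : pyUtf8Len line.toList = (line.toList.length : Int) := len_ascii hascii
  unfold fold_ical_line_py fold_ical_line_py_alt
  by_cases hsmall : pyUtf8Len line.toList ≤ maxo
  · rw [if_pos hsmall]
    have hz : (0 : Int) = ((([] : List Char)).length : Int) := by simp
    rw [hz, bFold_fits hascii (by simp only [List.length_nil, Nat.cast_zero, zero_add]; omega)]
    simp [joinCRLF, List.intercalate]
  · rw [if_neg hsmall]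
    have hk : 2 ≤ maxo := by
      rcases hpre with h | h
      · omega
      · exact h
    have hbig : maxo < (line.toList.length : Int) := by omega
    have hne : line.toList ≠ [] := by
      intro h
      rw [h] at hbig
      simp at hbig
      omega
    have hmain := main_loop hk (line.toList.length + 1) line.toList [] []
      hascii (Or.inl rfl) (by simpa using hne) (by omega)
    simp only [List.nil_append] at hmain
    have hz : (0 : Int) = ((([] : List Char)).length : Int) := by simp
    rw [hz]
    simp only [joinCRLF]
    rw [← hmain]
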